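-- pv_equiv track=rewrite | github.com/Aasthaengg/IBMdataset | Python_codes/p02686/s781937073.py | process
-- ===== SOURCE A (Python) =====
-- def     process(tab, beginning, end):
--     total = beginning
--     for i in tab:
--         if (i[1] > total or total + i[0] < 0):
--             return ("No")
--         total += i[0]
--     if (total == end):
--         return ("Yes")
--     return ("No")
-- ===== SOURCE B (Python) =====
-- def process(tab, beginning, end):
--     # Different algorithm: collapse every per-step constraint into ONE lower
--     # bound on `beginning`.  With s = sum of the deltas seen so far, step j
--     # demands beginning >= lo_j - s (before adding) and beginning >= -s
--     # (after adding).  So track s and the max of these thresholds, then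
--     # decide everything with a single comparison at the end.
--     s = 0
--     need = None
--     for delta, lo in tab:
--         need = lo - s if need is None else max(need, lo - s)
--         s += delta
--         need = max(need, -s)
--     ok = need is None or beginning >= need
--     return "Yes" if ok and beginning + s == end else "No"
-- ===== Notes on version B (the rewrite author's own statement) =====
-- stated objective: alternative
-- what changed: Instead of comparing each bound against the running total with early exit, B reduces all per-step constraints to a single lower bound on beginning (need = max of lo_j - S_j and -S_{j+1} over running delta sums) and decides with one comparison plus the final-sum equality.
import Mathlib
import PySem

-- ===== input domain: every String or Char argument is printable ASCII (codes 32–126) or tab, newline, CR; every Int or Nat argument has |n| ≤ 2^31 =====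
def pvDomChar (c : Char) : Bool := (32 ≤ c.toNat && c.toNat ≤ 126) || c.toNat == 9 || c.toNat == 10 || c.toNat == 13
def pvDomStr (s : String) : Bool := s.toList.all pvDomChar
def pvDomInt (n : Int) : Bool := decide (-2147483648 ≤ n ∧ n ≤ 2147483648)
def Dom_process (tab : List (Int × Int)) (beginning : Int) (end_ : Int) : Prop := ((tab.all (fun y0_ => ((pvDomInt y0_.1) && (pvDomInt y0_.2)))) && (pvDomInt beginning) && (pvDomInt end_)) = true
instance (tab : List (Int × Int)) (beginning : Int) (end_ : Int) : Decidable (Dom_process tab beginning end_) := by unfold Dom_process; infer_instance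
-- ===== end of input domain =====

-- B replaces A's running-total bound checks (early return on violation) by a
-- different algorithm: it collapses all per-step constraints into one lower
-- bound on `beginning` and decides with a single comparison; same O(n) cost
-- (objective: alternative).

-- ===== PORT A =====
def processLoop (tab : List (Int × Int)) (total : Int) (end_ : Int) : String :=
  match tab with
  | [] => if total = end_ then "Yes" else "No"
  | i :: rest =>
    if i.2 > total ∨ total + i.1 < 0 then "No"
    else processLoop rest (total + i.1) end_

def process (tab : List (Int × Int)) (beginning : Int) (end_ : Int) : String :=
  processLoop tab beginning end_

-- ===== PORT B =====
-- one loop step: need = lo - s if need is None else max(need, lo - s);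
--                s += delta; need = max(need, -s)
def altStep : (Int × Option Int) → (Int × Int) → (Int × Option Int)
  | (s, need), (delta, lo) =>
    let need1 : Int := match need with | none => lo - s | some n => max n (lo - s)
    let s1 := s + delta
    (s1, some (max need1 (-s1)))

-- ok = need is None or beginning >= need
def altOk (beginning : Int) : Option Int → Bool
  | none => true
  | some n => decide (beginning ≥ n)

def process_alt (tab : List (Int × Int)) (beginning : Int) (end_ : Int) : String :=
  let r := tab.foldl altStep (0, none)
  if altOk beginning r.2 ∧ beginning + r.1 = end_ then "Yes" else "No"

-- ===== PRECONDITION & SPEC =====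
def Spec_process (tab : List (Int × Int)) (beginning : Int) (end_ : Int) (out : String) : Prop := out = process_alt tab beginning end_
instance (tab : List (Int × Int)) (beginning : Int) (end_ : Int) (out : String) : Decidable (Spec_process tab beginning end_ out) := by unfold Spec_process; infer_instance

-- ===== CLAIM (what is proved, stated in full; the proofs are below) =====
def Claim_equal_process : Prop := ∀ (tab : List (Int × Int)) (beginning : Int) (end_ : Int), Dom_process tab beginning end_ → Spec_process tab beginning end_ (process tab beginning end_)

-- ===== LEMMAS AND PROOFS =====

-- Loop invariant: running A's loop from total = b + s with pending threshold n
-- matches B's fold started from state (s, n).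
lemma loop_eq_fold (tab : List (Int × Int)) (b e : Int) :
    ∀ (s : Int) (n : Option Int),
      (if altOk b n then processLoop tab (b + s) e else "No")
      = (if altOk b (tab.foldl altStep (s, n)).2 ∧ b + (tab.foldl altStep (s, n)).1 = e
         then "Yes" else "No") := by
  induction tab with
  | nil =>
    intro s n
    by_cases h : altOk b n = true <;> simp [processLoop, h]
  | cons p rest ih =>
    intro s n
    obtain ⟨delta, lo⟩ := p
    -- resolve the `match n` by cases, then run the same argument
    cases n with
    | none =>
      have hrhs := ih (s + delta) (some (max (lo - s) (-(s + delta))))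
      simp only [List.foldl_cons, altStep]
      refine Eq.trans ?_ hrhs
      have hkey : (altOk b (some (max (lo - s) (-(s + delta)))) = true)
          ↔ (altOk b none = true ∧ ¬(lo > b + s ∨ b + s + delta < 0)) := by
        simp [altOk]; omega
      by_cases hc : altOk b (some (max (lo - s) (-(s + delta)))) = true
      · obtain ⟨h1, h2⟩ := hkey.mp hc
        rw [if_pos hc, if_pos h1]
        simp only [processLoop]
        rw [if_neg h2]
        have : b + s + delta = b + (s + delta) := by ring
        rw [this]
      · rw [if_neg hc]
        rcases (not_and_or.mp (fun h => hc (hkey.mpr h))) with h | h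
        · rw [if_neg h]
        · rw [not_not] at h
          rw [if_pos (by simp [altOk])]
          simp only [processLoop]
          rw [if_pos h]
    | some nn =>
      have hrhs := ih (s + delta) (some (max (max nn (lo - s)) (-(s + delta))))
      simp only [List.foldl_cons, altStep]
      refine Eq.trans ?_ hrhs
      have hkey : (altOk b (some (max (max nn (lo - s)) (-(s + delta)))) = true)
          ↔ (altOk b (some nn) = true ∧ ¬(lo > b + s ∨ b + s + delta < 0)) := by
        simp [altOk]; omega
      by_cases hc : altOk b (some (max (max nn (lo - s)) (-(s + delta)))) = true
      · obtain ⟨h1, h2⟩ := hkey.mp hc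
        rw [if_pos hc, if_pos h1]
        simp only [processLoop]
        rw [if_neg h2]
        have : b + s + delta = b + (s + delta) := by ring
        rw [this]
      · rw [if_neg hc]
        rcases (not_and_or.mp (fun h => hc (hkey.mpr h))) with h | h
        · rw [if_neg h]
        · rw [not_not] at h
          by_cases h1 : altOk b (some nn) = true
          · rw [if_pos h1]
            simp only [processLoop]
            rw [if_pos h]
          · rw [if_neg h1]

-- ===== VERDICT (by name: the statement is the Claim_ definition above) =====
theorem process_spec : Claim_equal_process := by
  intro tab b e _
  unfold Spec_process process process_alt
  have := loop_eq_fold tab b e 0 none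
  simpa [altOk] using this
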